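-- pv_equiv track=rewrite | github.com/kotasukumar/python_pytest | binary_to_number.py | convert_to_binomial
-- ===== SOURCE A (Python) =====
-- def convert_to_binomial(remainder):
--     a = []
--     for i in range(2):
--         for j in range(4):
--             a.append(remainder[i][j])
--     n = 6
--     result = 0
--     for i in range(7):
--         result = result + (a[i] * power(2, n))
--         n -= 1
--     return result
--
-- def power(base, expon):
--     value = 1
--     for i in range(expon):
--         value = value * base
--     return value
-- ===== SOURCE B (Python) =====
-- def convert_to_binomial(remainder):
--     # Horner's method over the first 7 cells, addressed by k//4, k%4 (no flatten, no power helper)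
--     result = 0
--     for k in range(7):
--         result = result * 2 + remainder[k // 4][k % 4]
--     return result
-- ===== Notes on version B (the rewrite author's own statement) =====
-- stated objective: simpler
-- what changed: Replaces the flatten-then-power-sum (with a hand-written power helper) by a single Horner loop that addresses cell k as remainder[k//4][k%4].
-- outside the precondition, e.g. on convert_to_binomial([[1, 0, 1, 0], [1, 1, 0]]): A raises IndexError, B returns 86
import Mathlib
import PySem

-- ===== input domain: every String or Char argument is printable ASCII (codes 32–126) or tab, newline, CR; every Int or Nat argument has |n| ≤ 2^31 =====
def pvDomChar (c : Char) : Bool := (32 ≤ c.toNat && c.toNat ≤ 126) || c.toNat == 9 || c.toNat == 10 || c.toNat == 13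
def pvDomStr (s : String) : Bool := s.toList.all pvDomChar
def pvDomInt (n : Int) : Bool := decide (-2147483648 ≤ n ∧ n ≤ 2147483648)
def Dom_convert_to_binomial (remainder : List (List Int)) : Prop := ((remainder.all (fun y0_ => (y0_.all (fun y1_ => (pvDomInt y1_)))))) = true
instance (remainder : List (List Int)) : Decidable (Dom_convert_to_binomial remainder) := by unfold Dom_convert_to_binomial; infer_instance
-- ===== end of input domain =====

-- B replaces the flatten + power-helper sum by a single Horner loop addressing cell k as remainder[k//4][k%4]; return value only, no side effects.

-- ===== PORT A =====
def pvPower (base expon : Int) : Int :=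
  (PySem.List.pyRange 0 expon 1).foldl (fun v _ => v * base) 1

def convert_to_binomial (remainder : List (List Int)) : Int :=
  let a := (PySem.List.pyRange 0 2 1).foldl (fun acc i =>
      (PySem.List.pyRange 0 4 1).foldl (fun acc j =>
        acc ++ [PySem.List.pyGetD (PySem.List.pyGetD remainder i []) j 0]) acc) []
  ((PySem.List.pyRange 0 7 1).foldl (fun (p : Int × Int) i =>
      (p.1 + PySem.List.pyGetD a i 0 * pvPower 2 p.2, p.2 - 1)) (0, 6)).1

-- ===== PORT B =====
def convert_to_binomial_alt (remainder : List (List Int)) : Int :=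
  (PySem.List.pyRange 0 7 1).foldl (fun result k =>
    result * 2 + PySem.List.pyGetD (PySem.List.pyGetD remainder (PySem.Int.floordiv k 4) []) (PySem.Int.mod k 4) 0) 0

-- ===== PRECONDITION & SPEC =====
-- Pre_ excludes exactly the inputs where A raises IndexError: fewer than 2 rows, or one of the first two rows shorter than 4.
def Pre_convert_to_binomial (remainder : List (List Int)) : Prop :=
  2 ≤ remainder.length ∧ 4 ≤ (remainder.getD 0 []).length ∧ 4 ≤ (remainder.getD 1 []).length
instance (remainder : List (List Int)) : Decidable (Pre_convert_to_binomial remainder) := by unfold Pre_convert_to_binomial; infer_instance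
def pvWitness_convert_to_binomial : List (List Int) := [[1, 0, 1, 0], [1, 1, 0, 1]]

def Spec_convert_to_binomial (remainder : List (List Int)) (out : Int) : Prop := out = convert_to_binomial_alt remainder
instance (remainder : List (List Int)) (out : Int) : Decidable (Spec_convert_to_binomial remainder out) := by unfold Spec_convert_to_binomial; infer_instance

-- ===== CLAIM (what is proved, stated in full; the proofs are below) =====
def Claim_equal_convert_to_binomial : Prop := ∀ (remainder : List (List Int)), Dom_convert_to_binomial remainder → Pre_convert_to_binomial remainder → Spec_convert_to_binomial remainder (convert_to_binomial remainder)

-- ===== LEMMAS AND PROOFS =====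

-- ===== VERDICT (by name: the statement is the Claim_ definition above) =====
set_option maxHeartbeats 2000000 in
theorem convert_to_binomial_spec : Claim_equal_convert_to_binomial := by
  intro remainder _ hpre
  obtain ⟨h2, h0, h1⟩ := hpre
  match remainder, h2 with
  | r0 :: r1 :: t, _ =>
    simp only [List.getD, List.getElem?_cons_zero, List.getElem?_cons_succ, Option.getD_some] at h0 h1
    match r0, h0 with
    | a0 :: a1 :: a2 :: a3 :: t0, _ =>
      match r1, h1 with
      | b0 :: b1 :: b2 :: b3 :: t1, _ =>
        show _ = _
        have hA : (0:Int) ≤ (t.length:Int) + 1 := by omega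
        have hB : (1:Int) ≤ (t.length:Int) + 1 := by omega
        simp [convert_to_binomial, convert_to_binomial_alt, pvPower,
          PySem.List.pyRange, PySem.List.pyGetD, PySem.List.pyGet?, PySem.List.pyIdx?,
          PySem.Int.floordiv, PySem.Int.mod, List.range_succ, Int.fdiv, Int.fmod, hA, hB]
        split_ifs <;> first | omega | (simp <;> ring)
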